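-- pv_equiv track=rewrite | github.com/danieljdmurcia/dev_2025_3_workshop1 | src/string/strings.py | es_numero_entero
-- ===== SOURCE A (Python) =====
-- def es_numero_entero(texto):
--     if texto == "":
--         return False
--     i = 0
--     if texto[0] in "+-":
--         if len(texto) == 1:
--             return False
--         i = 1
--     while i < len(texto):
--         if texto[i] < '0' or texto[i] > '9':
--             return False
--         i += 1
--     return True
-- ===== SOURCE B (Python) =====
-- import re
--
-- _INT_RE = re.compile(r'[+-]?[0-9]+')
--
-- def es_numero_entero(texto):
--     return _INT_RE.fullmatch(texto) is not None
-- ===== Notes on version B (the rewrite author's own statement) =====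
-- stated objective: idiomatic
-- what changed: Replaces the hand-written index scan with early returns by a single regular-expression full match of [+-]?[0-9]+ (ASCII-digit class, so behaviour is identical).
import Mathlib
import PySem

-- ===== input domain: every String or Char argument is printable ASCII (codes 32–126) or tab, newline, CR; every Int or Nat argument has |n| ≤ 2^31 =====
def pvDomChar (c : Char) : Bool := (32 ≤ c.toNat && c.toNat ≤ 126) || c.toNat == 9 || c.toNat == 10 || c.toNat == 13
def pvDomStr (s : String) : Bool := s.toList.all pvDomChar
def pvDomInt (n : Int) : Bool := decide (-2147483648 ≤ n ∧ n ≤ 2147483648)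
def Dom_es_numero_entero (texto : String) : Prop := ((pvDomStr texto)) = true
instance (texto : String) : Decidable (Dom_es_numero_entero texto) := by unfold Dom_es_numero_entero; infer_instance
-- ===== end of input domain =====

-- B replaces A's hand-written index scan by a regex full match of [+-]?[0-9]+ (idiomatic; same behaviour).


-- ===== PORT A =====
-- the `while i < len(texto)` scan from index i: each step tests texto[i] < '0' or texto[i] > '9'
def pvLoopA : List Char → Bool
  | [] => true
  | c :: rest => if c < '0' || c > '9' then false else pvLoopA rest

-- A on the character list: empty check, sign check (with the len == 1 early False), then the while loop
def pvA : List Char → Bool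
  | [] => false                                  -- texto == "" → False
  | c :: rest =>
      if c = '+' || c = '-' then                 -- texto[0] in "+-"
        if rest = [] then false                  -- len(texto) == 1 → False
        else pvLoopA rest                        -- while loop from i = 1
      else pvLoopA (c :: rest)                   -- while loop from i = 0

def es_numero_entero (texto : String) : Bool := pvA texto.toList

-- ===== PORT B =====
-- hand port of re.fullmatch(r'[+-]?[0-9]+', texto): exact for this pattern — the optional-sign
-- branch is deterministic (a sign character is never a digit, so no backtracking can succeed).
-- [0-9]+ matched against the whole remaining input:
def pvDigitsPlus : List Char → Bool
  | [] => false
  | c :: rest => ('0' ≤ c && c ≤ '9') && rest.all (fun d => '0' ≤ d && d ≤ '9')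

def es_numero_entero_alt (texto : String) : Bool :=
  match texto.toList with
  | [] => pvDigitsPlus []                                          -- empty input: [0-9]+ fails
  | c :: rest =>
      if c = '+' || c = '-' then pvDigitsPlus rest                 -- [+-]? consumes the sign
      else pvDigitsPlus (c :: rest)                                -- [+-]? matches empty

-- ===== PRECONDITION & SPEC =====
def Spec_es_numero_entero (texto : String) (out : Bool) : Prop := out = es_numero_entero_alt texto
instance (texto : String) (out : Bool) : Decidable (Spec_es_numero_entero texto out) := by unfold Spec_es_numero_entero; infer_instance

-- ===== CLAIM (what is proved, stated in full; the proofs are below) =====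
def Claim_equal_es_numero_entero : Prop := ∀ (texto : String), Dom_es_numero_entero texto → Spec_es_numero_entero texto (es_numero_entero texto)

-- ===== LEMMAS AND PROOFS =====
theorem pvLoopA_eq_all (l : List Char) : pvLoopA l = l.all (fun d => '0' ≤ d && d ≤ '9') := by
  induction l with
  | nil => rfl
  | cons c rest ih =>
      simp only [pvLoopA, List.all_cons, ih]
      by_cases h1 : c < '0' <;> by_cases h2 : '9' < c <;>
        simp_all [not_lt]

theorem pvDigitsPlus_eq (l : List Char) :
    pvDigitsPlus l = (!l.isEmpty && l.all (fun d => '0' ≤ d && d ≤ '9')) := by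
  cases l with
  | nil => rfl
  | cons c rest => simp [pvDigitsPlus, List.all_cons]

-- ===== VERDICT (by name: the statement is the Claim_ definition above) =====
theorem es_numero_entero_spec : Claim_equal_es_numero_entero := by
  intro texto _
  show es_numero_entero texto = es_numero_entero_alt texto
  unfold es_numero_entero es_numero_entero_alt
  cases h : texto.toList with
  | nil => rfl
  | cons c rest =>
      by_cases hp : c = '+'
      · subst hp
        cases rest <;> simp [pvA, pvDigitsPlus_eq, pvLoopA_eq_all]
      · by_cases hm : c = '-'
        · subst hm
          cases rest <;> simp [pvA, pvDigitsPlus_eq, pvLoopA_eq_all]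
        · simp only [pvA, hp, hm, decide_false, Bool.or_self, Bool.false_eq_true,
            if_false, pvDigitsPlus, pvLoopA, pvLoopA_eq_all]
          by_cases h1 : c < '0'
          · simp [h1, not_le.mpr h1]
          · by_cases h2 : '9' < c
            · simp [h1, h2, not_le.mpr h2]
            · simp [h1, h2, not_lt.mp h1, not_lt.mp h2]
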